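-- pv_equiv track=rewrite | github.com/kinglegendzzh/chordPrediction | hmm/trainHmm.py | chord_seq_to_state_seq
-- ===== SOURCE A (Python) =====
-- def chord_seq_to_state_seq(chord_seq):
--     code_dict = {}
--     next_code = 0
--     state_seq = []
--     for chord in chord_seq:
--         if chord not in code_dict:
--             code_dict[chord] = next_code
--             next_code += 1
--         state_seq.append(code_dict[chord])
--     return state_seq, code_dict
-- ===== SOURCE B (Python) =====
-- def chord_seq_to_state_seq(chord_seq):
--     # code(c) = number of distinct chords strictly before c's first occurrence
--     def code(c):
--         return len(set(chord_seq[:chord_seq.index(c)]))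
--     state_seq = [code(c) for c in chord_seq]
--     code_dict = {c: code(c) for i, c in enumerate(chord_seq) if c not in chord_seq[:i]}
--     return state_seq, code_dict
-- ===== Notes on version B (the rewrite author's own statement) =====
-- stated objective: alternative
-- what changed: Codes are computed positionally per element — code(c) = len(set(chord_seq[:chord_seq.index(c)])), the number of distinct chords before c's first occurrence — instead of A's single fused pass that assigns codes from an incrementing counter stored in a dict; it trades A's linear pass for quadratic per-element index/slice/set work.
import Mathlib
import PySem

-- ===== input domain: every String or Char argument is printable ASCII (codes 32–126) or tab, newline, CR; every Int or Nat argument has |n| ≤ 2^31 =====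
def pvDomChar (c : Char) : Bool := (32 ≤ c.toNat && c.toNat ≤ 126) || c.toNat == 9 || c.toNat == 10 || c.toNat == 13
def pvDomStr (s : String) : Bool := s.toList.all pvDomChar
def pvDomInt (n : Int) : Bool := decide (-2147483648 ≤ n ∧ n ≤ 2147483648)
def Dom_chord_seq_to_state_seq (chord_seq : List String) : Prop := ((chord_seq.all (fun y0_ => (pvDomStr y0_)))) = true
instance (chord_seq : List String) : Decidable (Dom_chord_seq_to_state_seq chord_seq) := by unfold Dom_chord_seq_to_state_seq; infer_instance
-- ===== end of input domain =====

-- B computes each code positionally (distinct-count of the prefix before the first occurrence) instead of A's fused dict+counter pass; alternative algorithm, not faster.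

-- ===== PORT A =====
-- one fused loop: dict of first-seen codes, a counter, and the output list built together
def chord_seq_to_state_seq (chord_seq : List String) : List Int × (List (String × Int)) :=
  let st := chord_seq.foldl
    (fun (s : PySem.Dict String Int × Int × List Int) chord =>
      let d := s.1; let next_code := s.2.1; let state_seq := s.2.2
      let (d, next_code) :=
        if d.contains chord then (d, next_code) else (d.insert chord next_code, next_code + 1)
      -- code_dict[chord]: the key is always present at this point, so getD's default is never read
      (d, next_code, state_seq ++ [d.getD chord 0]))
    (PySem.Dict.empty, 0, [])
  (st.2.2, st.1.items)

-- ===== PORT B =====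
-- code(c) = len(set(chord_seq[:chord_seq.index(c)]))
def pvCode (chord_seq : List String) (c : String) : Int :=
  -- chord_seq.index(c): at every call site c is an element of chord_seq, so getD's default is never read
  let i := (PySem.List.index? chord_seq c).getD 0
  ((PySem.Set.ofList (PySem.List.slice chord_seq none (some (i : Int)))).length : Int)

def chord_seq_to_state_seq_alt (chord_seq : List String) : List Int × (List (String × Int)) :=
  let state_seq := chord_seq.map (fun c => pvCode chord_seq c)
  -- {c: code(c) for i, c in enumerate(chord_seq) if c not in chord_seq[:i]}
  let code_dict := ((PySem.List.enumerate chord_seq 0).filter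
      (fun p => !(decide (p.2 ∈ PySem.List.slice chord_seq none (some p.1))))).foldl
      (fun d p => d.insert p.2 (pvCode chord_seq p.2)) PySem.Dict.empty
  (state_seq, code_dict.items)

-- ===== PRECONDITION & SPEC =====
def Spec_chord_seq_to_state_seq (chord_seq : List String) (out : List Int × (List (String × Int))) : Prop := out = chord_seq_to_state_seq_alt chord_seq
instance (chord_seq : List String) (out : List Int × (List (String × Int))) : Decidable (Spec_chord_seq_to_state_seq chord_seq out) := by unfold Spec_chord_seq_to_state_seq; infer_instance

-- ===== CLAIM (what is proved, stated in full; the proofs are below) =====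
def Claim_equal_chord_seq_to_state_seq : Prop := ∀ (chord_seq : List String), Dom_chord_seq_to_state_seq chord_seq → Spec_chord_seq_to_state_seq chord_seq (chord_seq_to_state_seq chord_seq)

-- ===== LEMMAS AND PROOFS =====

-- proof-only canonical form: the dict of (chord, first-seen index) pairs of a nodup list
def pvCodeDict (unique : List String) : PySem.Dict String Int :=
  (PySem.List.enumerate unique 0).foldl (fun d p => d.insert p.2 p.1) PySem.Dict.empty

theorem pvCodeDict_eq_mk (u : List String) (hu : u.Nodup) :
    pvCodeDict u = PySem.Dict.mk ((PySem.List.enumerate u 0).map (fun p => (p.2, p.1))) := by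
  apply PySem.Dict.ext
  have h := PySem.Dict.items_foldl_insert_fresh (PySem.List.enumerate u 0)
    (fun p => p.2) (fun p => p.1) PySem.Dict.empty
    (by intro a _; simp [PySem.Dict.contains_empty])
    (by rw [PySem.List.map_snd_enumerate]; exact hu)
  simpa [pvCodeDict] using h

theorem get?_mk_enum (u : List String) (s : Int) (c : String) :
    (PySem.Dict.mk ((PySem.List.enumerate u s).map (fun p => (p.2, p.1)))).get? c
    = (PySem.List.index? u c).map (fun k => s + (k : Int)) := by
  induction u generalizing s with
  | nil => simp [PySem.List.enumerate_nil, PySem.List.index?, PySem.Dict.get?]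
  | cons x xs ih =>
    rw [PySem.List.enumerate_cons]
    simp only [List.map_cons, PySem.Dict.get?_mk_cons, ih (s+1)]
    by_cases h : x = c
    · subst h; rw [PySem.List.index?_cons_self]; simp
    · rw [PySem.List.index?_cons_of_ne _ h]
      simp only [beq_iff_eq, h, if_false]
      cases PySem.List.index? xs c with
      | none => simp
      | some k =>
        simp
        ring

theorem get?_pvCodeDict (u : List String) (hu : u.Nodup) (c : String) :
    (pvCodeDict u).get? c = (PySem.List.index? u c).map (fun k => (k : Int)) := by
  rw [pvCodeDict_eq_mk u hu, get?_mk_enum]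
  cases PySem.List.index? u c <;> simp

theorem contains_pvCodeDict (u : List String) (hu : u.Nodup) (c : String) :
    (pvCodeDict u).contains c = decide (c ∈ u) := by
  rw [PySem.Dict.contains_eq_isSome_get?, get?_pvCodeDict u hu, PySem.List.index?_eq_idxOf?]
  cases hI : List.idxOf? c u with
  | none => simp [List.idxOf?_eq_none_iff.1 hI]
  | some k =>
    have hm : c ∈ u := by
      by_contra hn
      rw [List.idxOf?_eq_none_iff.2 hn] at hI
      cases hI
    simp [hm]

theorem pvCodeDict_append_singleton (u : List String) (hu : u.Nodup) (c : String) (hc : c ∉ u) :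
    (pvCodeDict u).insert c (u.length : Int) = pvCodeDict (u ++ [c]) := by
  have hu' : (u ++ [c]).Nodup := by
    rw [List.nodup_append]
    refine ⟨hu, List.nodup_singleton c, ?_⟩
    intro a ha b hb
    simp only [List.mem_singleton] at hb
    exact fun he => hc ((he.trans hb) ▸ ha)
  rw [pvCodeDict_eq_mk u hu, pvCodeDict_eq_mk _ hu']
  apply PySem.Dict.ext
  rw [PySem.Dict.items_insert_of_not_contains]
  · rw [PySem.List.enumerate_append]
    simp [PySem.List.enumerate_cons, PySem.List.enumerate_nil]
  · rw [← pvCodeDict_eq_mk u hu, contains_pvCodeDict u hu]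
    simp [hc]

theorem getD_pvCodeDict_append (u w : List String) (h : (u ++ w).Nodup) (c : String) (hc : c ∈ u) :
    (pvCodeDict (u ++ w)).getD c 0 = (pvCodeDict u).getD c 0 := by
  rw [PySem.Dict.getD_eq_get?_getD, PySem.Dict.getD_eq_get?_getD,
    get?_pvCodeDict _ h, get?_pvCodeDict u (h.sublist (List.sublist_append_left u w)),
    PySem.List.index?_append_of_mem w hc]

theorem getD_pvCodeDict_last (u : List String) (hu : u.Nodup) (c : String) (hc : c ∉ u) :
    (pvCodeDict (u ++ [c])).getD c 0 = (u.length : Int) := by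
  have hu' : (u ++ [c]).Nodup := by
    rw [List.nodup_append]
    refine ⟨hu, List.nodup_singleton c, ?_⟩
    intro a ha b hb
    simp only [List.mem_singleton] at hb
    exact fun he => hc ((he.trans hb) ▸ ha)
  rw [PySem.Dict.getD_eq_get?_getD, get?_pvCodeDict _ hu',
    PySem.List.index?_append_singleton_self u c hc]
  simp

theorem update_prefix (l u : List String) : ∃ w, PySem.Set.update u l = u ++ w := by
  induction l generalizing u with
  | nil => exact ⟨[], by simp [PySem.Set.update]⟩
  | cons c l ih =>
    show ∃ w, PySem.Set.update (PySem.Set.add u c) l = u ++ w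
    by_cases h : c ∈ u
    · rw [PySem.Set.add_of_mem h]; exact ih u
    · obtain ⟨w, hw⟩ := ih (u ++ [c])
      exact ⟨c :: w, by rw [PySem.Set.add_of_not_mem h, hw, List.append_assoc]; rfl⟩

-- the invariant of A's fused loop, started from the state describing an already-seen list u
theorem loopA (l : List String) (u : List String) (hu : u.Nodup) (seq : List Int) :
    l.foldl
      (fun (s : PySem.Dict String Int × Int × List Int) chord =>
        let d := s.1; let next_code := s.2.1; let state_seq := s.2.2
        let (d, next_code) :=
          if d.contains chord then (d, next_code) else (d.insert chord next_code, next_code + 1)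
        (d, next_code, state_seq ++ [d.getD chord 0]))
      (pvCodeDict u, (u.length : Int), seq)
    = (pvCodeDict (PySem.Set.update u l), ((PySem.Set.update u l).length : Int),
       seq ++ l.map (fun c => (pvCodeDict (PySem.Set.update u l)).getD c 0)) := by
  induction l generalizing u seq with
  | nil => simp [PySem.Set.update]
  | cons c l ih =>
    rw [List.foldl_cons]
    have hupd : PySem.Set.update u (c :: l) = PySem.Set.update (PySem.Set.add u c) l := rfl
    by_cases h : c ∈ u
    · have hstep : (if (pvCodeDict u).contains c then (pvCodeDict u, (u.length : Int))
          else ((pvCodeDict u).insert c u.length, (u.length : Int) + 1)) = (pvCodeDict u, (u.length : Int)) := by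
        rw [contains_pvCodeDict u hu]; simp [h]
      simp only [hstep]
      rw [ih u hu (seq ++ [(pvCodeDict u).getD c 0])]
      rw [hupd, PySem.Set.add_of_mem h]
      obtain ⟨w, hw⟩ := update_prefix l u
      have hnd : (PySem.Set.update u l).Nodup := PySem.Set.nodup_update u l hu
      have : (pvCodeDict (PySem.Set.update u l)).getD c 0 = (pvCodeDict u).getD c 0 := by
        rw [hw]
        exact getD_pvCodeDict_append u w (hw ▸ hnd) c h
      rw [List.map_cons, this, List.append_assoc]
      rfl
    · have hu' : (u ++ [c]).Nodup := by
        rw [List.nodup_append]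
        refine ⟨hu, List.nodup_singleton c, ?_⟩
        intro a ha b hb
        simp only [List.mem_singleton] at hb
        exact fun he => h ((he.trans hb) ▸ ha)
      have hstep : (if (pvCodeDict u).contains c then (pvCodeDict u, (u.length : Int))
          else ((pvCodeDict u).insert c u.length, (u.length : Int) + 1))
          = (pvCodeDict (u ++ [c]), ((u ++ [c]).length : Int)) := by
        rw [contains_pvCodeDict u hu]
        simp only [h, decide_false, pvCodeDict_append_singleton u hu c h]
        simp
      simp only [hstep]
      have hget : (pvCodeDict (u ++ [c])).getD c 0 = (u.length : Int) :=
        getD_pvCodeDict_last u hu c h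
      rw [hget, ih (u ++ [c]) hu' (seq ++ [(u.length : Int)])]
      rw [hupd, PySem.Set.add_of_not_mem h]
      obtain ⟨w, hw⟩ := update_prefix l (u ++ [c])
      have hnd : (PySem.Set.update (u ++ [c]) l).Nodup := PySem.Set.nodup_update _ l hu'
      have hc' : (pvCodeDict (PySem.Set.update (u ++ [c]) l)).getD c 0 = (u.length : Int) := by
        rw [hw, getD_pvCodeDict_append (u ++ [c]) w (hw ▸ hnd) c (by simp), hget]
      rw [List.map_cons, hc', List.append_assoc]
      rfl

-- ===== B-side lemmas =====

-- the first-occurrence index of c in the accumulated distinct list equals the distinct-count of the prefix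
theorem index?_update_of_index? (l : List String) (u : List String) (c : String) (i : Nat)
    (hc : c ∉ u) (h : PySem.List.index? l c = some i) :
    PySem.List.index? (PySem.Set.update u l) c
      = some ((PySem.Set.update u (l.take i)).length) := by
  induction l generalizing u i with
  | nil => simp [PySem.List.index?_eq_idxOf?] at h
  | cons x xs ih =>
    by_cases hx : x = c
    · subst hx
      rw [PySem.List.index?_cons_self] at h
      obtain rfl : i = 0 := by injection h; omega
      show PySem.List.index? (PySem.Set.update (PySem.Set.add u x) xs) x
          = some (PySem.Set.update u []).length
      rw [PySem.Set.add_of_not_mem hc]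
      obtain ⟨w, hw⟩ := update_prefix xs (u ++ [x])
      rw [hw, PySem.List.index?_append_of_mem w (by simp : x ∈ u ++ [x]),
        PySem.List.index?_append_singleton_self u x hc]
      simp [PySem.Set.update]
    · rw [PySem.List.index?_cons_of_ne _ hx] at h
      cases hj : PySem.List.index? xs c with
      | none => rw [hj] at h; simp at h
      | some j =>
        rw [hj] at h
        obtain rfl : i = j + 1 := by simp at h; omega
        have hc' : c ∉ PySem.Set.add u x := by
          by_cases hm : x ∈ u
          · rwa [PySem.Set.add_of_mem hm]
          · rw [PySem.Set.add_of_not_mem hm]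
            simp [hc, Ne.symm hx]
        have := ih (PySem.Set.add u x) j hc' hj
        rw [List.take_succ_cons]
        exact this

theorem update_nil_eq_ofList (l : List String) : PySem.Set.update [] l = PySem.Set.ofList l := by
  rw [PySem.Set.ofList_eq_foldl]; rfl

-- B's positional code of a chord is its first-seen index, the value stored in the canonical dict
theorem pvCode_eq_getD (l : List String) (c : String) (hc : c ∈ l) :
    pvCode l c = (pvCodeDict (PySem.List.dedup l)).getD c 0 := by
  cases hi : PySem.List.index? l c with
  | none => exact absurd hc ((PySem.List.index?_eq_none_iff l c).1 hi)
  | some i =>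
    have hkey := index?_update_of_index? l [] c i (by simp) hi
    rw [update_nil_eq_ofList, update_nil_eq_ofList, ← PySem.List.dedup_eq_ofList,
      ← PySem.List.dedup_eq_ofList] at hkey
    rw [PySem.Dict.getD_eq_get?_getD,
      get?_pvCodeDict (PySem.List.dedup l) (PySem.List.nodup_dedup l) c, hkey]
    simp only [pvCode, hi, Option.getD_some, PySem.List.slice_to_natCast,
      PySem.List.dedup_eq_ofList]
    simp

-- the comprehension's filter keeps exactly the first occurrences, in order
theorem firsts_eq (suf pre : List String) :
    ((PySem.List.enumerate suf ((pre.length : Nat) : Int)).filter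
        (fun p => !(decide (p.2 ∈ PySem.List.slice (pre ++ suf) none (some p.1))))).map
        (fun p => p.2)
    = (PySem.Set.update (PySem.Set.ofList pre) suf).drop (PySem.Set.ofList pre).length := by
  induction suf generalizing pre with
  | nil =>
    simp [PySem.List.enumerate_nil, PySem.Set.update]
  | cons x xs ih =>
    rw [PySem.List.enumerate_cons, List.filter_cons]
    have hsl : PySem.List.slice (pre ++ x :: xs) none (some ((pre.length : Nat) : Int))
        = pre := by
      rw [PySem.List.slice_to_natCast]
      exact List.take_left
    have hassoc : pre ++ x :: xs = (pre ++ [x]) ++ xs := by simp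
    have hstart : ((pre.length : Nat) : Int) + 1 = (((pre ++ [x]).length : Nat) : Int) := by
      simp only [List.length_append, List.length_cons, List.length_nil]
      push_cast
      ring
    have hupd : PySem.Set.update (PySem.Set.ofList pre) (x :: xs)
        = PySem.Set.update (PySem.Set.add (PySem.Set.ofList pre) x) xs := rfl
    by_cases h : x ∈ pre
    · have hcond : (!(decide (x ∈ PySem.List.slice (pre ++ x :: xs) none
          (some ((pre.length : Nat) : Int))))) = false := by
        rw [hsl]; simp [h]
      rw [hcond, if_neg (by simp)]
      have hmem : x ∈ PySem.Set.ofList pre := by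
        rw [PySem.Set.mem_ofList]; exact h
      have hof : PySem.Set.ofList (pre ++ [x]) = PySem.Set.ofList pre := by
        rw [PySem.Set.ofList_eq_foldl, List.foldl_append, ← PySem.Set.ofList_eq_foldl]
        exact PySem.Set.add_of_mem hmem
      have hIH := ih (pre ++ [x])
      rw [hof] at hIH
      rw [hstart, hassoc, hIH, hupd, PySem.Set.add_of_mem hmem]
    · have hcond : (!(decide (x ∈ PySem.List.slice (pre ++ x :: xs) none
          (some ((pre.length : Nat) : Int))))) = true := by
        rw [hsl]; simp [h]
      rw [hcond, if_pos rfl, List.map_cons]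
      have hxof : x ∉ PySem.Set.ofList pre := by
        rw [PySem.Set.mem_ofList]; exact h
      have hof : PySem.Set.ofList (pre ++ [x]) = PySem.Set.ofList pre ++ [x] := by
        rw [PySem.Set.ofList_eq_foldl, List.foldl_append, ← PySem.Set.ofList_eq_foldl]
        exact PySem.Set.add_of_not_mem hxof
      have hIH := ih (pre ++ [x])
      rw [hof] at hIH
      rw [hstart, hassoc, hIH, hupd, PySem.Set.add_of_not_mem hxof]
      obtain ⟨w, hw⟩ := update_prefix xs (PySem.Set.ofList pre ++ [x])
      rw [hw]
      have hlen : (PySem.Set.ofList pre ++ [x]).length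
          = (PySem.Set.ofList pre).length + 1 := by simp
      have hL : List.drop ((PySem.Set.ofList pre ++ [x]).length)
          ((PySem.Set.ofList pre ++ [x]) ++ w) = w := List.drop_left
      have hR : List.drop ((PySem.Set.ofList pre).length)
          ((PySem.Set.ofList pre ++ [x]) ++ w) = x :: w := by
        rw [List.append_assoc, List.drop_left]
        rfl
      rw [hL, hR]

-- swapping enumerate pairs of a list whose codes are its positions
theorem enum_map_swap (u : List String) (f : String → Int) :
    ∀ s : Int, (∀ (k : Nat) (h : k < u.length), f u[k] = s + (k : Int)) →
    (PySem.List.enumerate u s).map (fun p => (p.2, p.1)) = u.map (fun c => (c, f c)) := by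
  induction u with
  | nil => intro s _; simp [PySem.List.enumerate_nil]
  | cons x xs ih =>
    intro s hf
    rw [PySem.List.enumerate_cons, List.map_cons, List.map_cons]
    have h0 : f x = s := by simpa using hf 0 (by simp)
    rw [h0, ih (s + 1) (fun k hk => by
      have := hf (k + 1) (by simpa using Nat.succ_lt_succ hk)
      simpa [add_assoc, add_comm, add_left_comm] using this)]

-- index? of the k-th element of a nodup list is k
theorem index?_getElem_of_nodup (u : List String) (hu : u.Nodup) (k : Nat) (hk : k < u.length) :
    PySem.List.index? u u[k] = some k := by
  cases hj : PySem.List.index? u u[k] with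
  | none => exact absurd (List.getElem_mem hk) ((PySem.List.index?_eq_none_iff u u[k]).1 hj)
  | some j =>
    obtain ⟨hjl, hje, -⟩ := PySem.List.getElem_of_index?_eq_some hj
    have hjk : j = k := (List.Nodup.getElem_inj_iff hu).1 hje
    exact congrArg some hjk

theorem pvCode_getElem (l : List String) (k : Nat) (hk : k < (PySem.List.dedup l).length) :
    pvCode l ((PySem.List.dedup l)[k]) = (0 : Int) + (k : Int) := by
  have hm : (PySem.List.dedup l)[k] ∈ l :=
    (PySem.List.mem_dedup l ((PySem.List.dedup l)[k])).1 (List.getElem_mem hk)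
  rw [pvCode_eq_getD l _ hm, PySem.Dict.getD_eq_get?_getD,
    get?_pvCodeDict _ (PySem.List.nodup_dedup l),
    index?_getElem_of_nodup _ (PySem.List.nodup_dedup l) k hk]
  simp

-- the canonical dict rendered as items
theorem items_pvCodeDict_dedup (l : List String) :
    (pvCodeDict (PySem.List.dedup l)).items
    = (PySem.List.dedup l).map (fun c => (c, pvCode l c)) := by
  rw [pvCodeDict_eq_mk _ (PySem.List.nodup_dedup l)]
  show (PySem.List.enumerate (PySem.List.dedup l) 0).map (fun p => (p.2, p.1)) = _
  exact enum_map_swap (PySem.List.dedup l) (pvCode l) 0 (fun k hk => pvCode_getElem l k hk)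

-- ===== VERDICT (by name: the statement is the Claim_ definition above) =====
theorem chord_seq_to_state_seq_spec : Claim_equal_chord_seq_to_state_seq := by
  intro l _
  unfold Spec_chord_seq_to_state_seq chord_seq_to_state_seq chord_seq_to_state_seq_alt
  have he : PySem.Set.update [] l = PySem.List.dedup l := by
    rw [update_nil_eq_ofList, PySem.List.dedup_eq_ofList]
  have hA := loopA l [] List.nodup_nil []
  rw [he] at hA
  have h0 : ((PySem.Dict.empty : PySem.Dict String Int), (0 : Int), ([] : List Int))
      = (pvCodeDict [], ((List.length ([] : List String)) : Int), ([] : List Int)) := by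
    norm_num; rfl
  rw [h0, hA]
  have hfirst : ((PySem.List.enumerate l 0).filter
      (fun p => !(decide (p.2 ∈ PySem.List.slice l none (some p.1))))).map (fun p => p.2)
      = PySem.List.dedup l := by
    have := firsts_eq l []
    simpa [update_nil_eq_ofList, PySem.List.dedup_eq_ofList] using this
  have hitems : (((PySem.List.enumerate l 0).filter
      (fun p => !(decide (p.2 ∈ PySem.List.slice l none (some p.1))))).foldl
      (fun d p => d.insert p.2 (pvCode l p.2)) PySem.Dict.empty).items
      = ((PySem.List.enumerate l 0).filter
      (fun p => !(decide (p.2 ∈ PySem.List.slice l none (some p.1))))).map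
        (fun p => (p.2, pvCode l p.2)) := by
    have h := PySem.Dict.items_foldl_insert_fresh
      ((PySem.List.enumerate l 0).filter
        (fun p => !(decide (p.2 ∈ PySem.List.slice l none (some p.1)))))
      (fun p => p.2) (fun p => pvCode l p.2) PySem.Dict.empty
      (by intro a _; simp [PySem.Dict.contains_empty])
      (by rw [hfirst]; exact PySem.List.nodup_dedup l)
    simpa using h
  have hmap2 : ((PySem.List.enumerate l 0).filter
      (fun p => !(decide (p.2 ∈ PySem.List.slice l none (some p.1))))).map
        (fun p => (p.2, pvCode l p.2))
      = (PySem.List.dedup l).map (fun c => (c, pvCode l c)) := by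
    rw [← hfirst, List.map_map]
    rfl
  simp only [hitems, hmap2, items_pvCodeDict_dedup, Prod.mk.injEq]
  refine ⟨?_, trivial⟩
  exact List.map_congr_left (fun c hc => (pvCode_eq_getD l c hc).symm)
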